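-- pv_equiv track=rewrite | github.com/indoria/persona-rag | lib/nlp/spacy_nlp.py | _reconstruct_summary_order
-- ===== SOURCE A (Python) =====
-- def _reconstruct_summary_order(original_sentences, summarized_sentences_text):
--     """Reconstructs the summary in the original sentence order."""
--     final_summary_sentences = []
--     # Use a set for faster lookup of summarized sentences
--     summarized_set = set(summarized_sentences_text)
--     for original_sent in original_sentences:
--         if original_sent in summarized_set:
--             final_summary_sentences.append(original_sent)
--             summarized_set.remove(original_sent) # Ensure unique inclusion if text identical
--     return " ".join(final_summary_sentences)
-- ===== SOURCE B (Python) =====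
-- def _reconstruct_summary_order(original_sentences, summarized_sentences_text):
--     """Reconstructs the summary in the original sentence order."""
--     idx = {}
--     for i, sent in enumerate(original_sentences):
--         idx.setdefault(sent, i)  # first original index of each distinct sentence
--     present = [t for t in set(summarized_sentences_text) if t in idx]
--     present.sort(key=idx.__getitem__)
--     return " ".join(present)
-- ===== Notes on version B (the rewrite author's own statement) =====
-- stated objective: alternative
-- what changed: Instead of scanning the originals while deleting matched texts from a shrinking set, B builds a first-index dict with setdefault, filters the distinct summarized texts to the dict's keys, and sorts them by that first index.
import Mathlib
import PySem

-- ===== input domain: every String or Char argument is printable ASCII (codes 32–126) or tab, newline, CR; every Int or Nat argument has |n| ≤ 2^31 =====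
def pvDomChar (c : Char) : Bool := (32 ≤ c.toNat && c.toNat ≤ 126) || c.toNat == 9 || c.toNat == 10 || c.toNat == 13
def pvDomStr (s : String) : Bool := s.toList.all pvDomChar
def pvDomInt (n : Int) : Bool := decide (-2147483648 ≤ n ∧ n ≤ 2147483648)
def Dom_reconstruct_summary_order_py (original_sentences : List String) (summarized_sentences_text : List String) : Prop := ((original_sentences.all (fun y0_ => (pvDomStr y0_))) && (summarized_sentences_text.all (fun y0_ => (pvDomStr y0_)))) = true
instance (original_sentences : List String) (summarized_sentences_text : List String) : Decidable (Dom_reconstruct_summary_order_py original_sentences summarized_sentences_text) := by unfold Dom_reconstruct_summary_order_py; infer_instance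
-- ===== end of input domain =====

-- B re-implements the in-order scan with set deletion as: filter the distinct summarized
-- texts to those occurring in the original, then sort by first original index (alternative
-- decomposition, same cost class; equivalence proved for the return value on all inputs).

-- ===== PORT A =====
-- loop state: (final_summary_sentences, summarized_set); `summarized_set.remove(x)` is
-- guarded by the membership test, so it never raises: ported as Set.discard (exact there).
def reconstruct_summary_order_py (original_sentences : List String) (summarized_sentences_text : List String) : String :=
  let st := original_sentences.foldl
    (fun (acc : List String × PySem.Set String) x =>
      if PySem.Set.contains acc.2 x then (acc.1 ++ [x], PySem.Set.discard acc.2 x) else acc)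
    ([], PySem.Set.ofList summarized_sentences_text)
  PySem.Str.join " " st.1

-- ===== PORT B =====
-- idx: first original index of each distinct sentence (setdefault keeps the earliest);
-- `idx.__getitem__` is only applied to keys of idx, so it never raises: ported as getD 0.
def reconstruct_summary_order_py_alt (original_sentences : List String) (summarized_sentences_text : List String) : String :=
  let idx := (PySem.List.enumerate original_sentences).foldl
    (fun (d : PySem.Dict String Int) p => d.setdefault p.2 p.1) PySem.Dict.empty
  let present := (PySem.Set.ofList summarized_sentences_text).filter
    (fun t => idx.contains t)
  let present' := PySem.List.sorted present (fun t => idx.getD t 0)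
  PySem.Str.join " " present'

-- ===== PRECONDITION & SPEC =====
def Spec_reconstruct_summary_order_py (original_sentences : List String) (summarized_sentences_text : List String) (out : String) : Prop := out = reconstruct_summary_order_py_alt original_sentences summarized_sentences_text
instance (original_sentences : List String) (summarized_sentences_text : List String) (out : String) : Decidable (Spec_reconstruct_summary_order_py original_sentences summarized_sentences_text out) := by unfold Spec_reconstruct_summary_order_py; infer_instance

-- ===== CLAIM (what is proved, stated in full; the proofs are below) =====
def Claim_equal_reconstruct_summary_order_py : Prop := ∀ (original_sentences : List String) (summarized_sentences_text : List String), Dom_reconstruct_summary_order_py original_sentences summarized_sentences_text → Spec_reconstruct_summary_order_py original_sentences summarized_sentences_text (reconstruct_summary_order_py original_sentences summarized_sentences_text)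

-- ===== LEMMAS AND PROOFS =====

-- A's loop as a standalone scan over the remaining originals and the current set.
def pvScan : List String → PySem.Set String → List String
  | [], _ => []
  | x :: xs, s =>
    if x ∈ s then x :: pvScan xs (PySem.Set.discard s x) else pvScan xs s

theorem pvFoldA (xs : List String) (acc : List String) (s : PySem.Set String) :
    (xs.foldl
      (fun (acc : List String × PySem.Set String) x =>
        if decide (x ∈ acc.2) = true then (acc.1 ++ [x], PySem.Set.discard acc.2 x) else acc)
      (acc, s)).1 = acc ++ pvScan xs s := by
  induction xs generalizing acc s with
  | nil => simp [pvScan]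
  | cons x xs ih =>
    simp only [List.foldl_cons, pvScan]
    by_cases h : x ∈ s
    · simp only [h, decide_true, if_pos, ih, List.append_assoc, List.singleton_append]
    · simp only [h, decide_false, Bool.false_eq_true, if_neg, not_false_iff, ih]

theorem pvScan_eq_filter (xs : List String) (s : PySem.Set String) :
    pvScan xs s = (PySem.Set.ofList xs).filter (fun t => decide (t ∈ s)) := by
  induction xs generalizing s with
  | nil => simp [pvScan, PySem.Set.ofList]
  | cons x xs ih =>
    rw [PySem.Set.ofList_cons]
    by_cases h : x ∈ s
    · simp only [pvScan, h, if_pos, List.filter_cons, decide_true, ih]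
      congr 1
      unfold PySem.Set.discard
      rw [List.filter_filter]
      apply List.filter_congr
      intro t _
      by_cases ht : t = x
      · subst ht; simp
      · simp [ht]
    · simp only [pvScan, h, if_neg, not_false_iff, List.filter_cons, decide_false,
        Bool.false_eq_true, ih]
      unfold PySem.Set.discard
      rw [List.filter_filter]
      apply List.filter_congr
      intro t _
      by_cases ht : t = x
      · subst ht; simp [h]
      · simp [ht]

-- the key `first original index` is strictly increasing along the deduplicated original list
theorem pvPairwise_key (orig : List String) :
    (PySem.Set.ofList orig).Pairwise
      (fun a b => (PySem.List.index? orig a).getD 0 < (PySem.List.index? orig b).getD 0) := by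
  induction orig using List.reverseRecOn with
  | nil => simp [PySem.Set.ofList]
  | append_singleton xs x ih =>
    rw [PySem.Set.ofList_append_singleton]
    by_cases hx : x ∈ PySem.Set.ofList xs
    · rw [PySem.Set.add_of_mem hx]
      refine List.Pairwise.imp_of_mem ?_ ih
      intro a b ha hb hab
      have ha' : a ∈ xs := (PySem.Set.mem_ofList xs a).1 ha
      have hb' : b ∈ xs := (PySem.Set.mem_ofList xs b).1 hb
      rwa [PySem.List.index?_append_of_mem [x] ha', PySem.List.index?_append_of_mem [x] hb']
    · rw [PySem.Set.add_of_not_mem hx]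
      have hx' : x ∉ xs := fun h => hx ((PySem.Set.mem_ofList xs x).2 h)
      rw [List.pairwise_append]
      refine ⟨?_, by simp, ?_⟩
      · refine List.Pairwise.imp_of_mem ?_ ih
        intro a b ha hb hab
        have ha' : a ∈ xs := (PySem.Set.mem_ofList xs a).1 ha
        have hb' : b ∈ xs := (PySem.Set.mem_ofList xs b).1 hb
        rwa [PySem.List.index?_append_of_mem [x] ha', PySem.List.index?_append_of_mem [x] hb']
      · intro a ha b hb
        have hbx : b = x := by simpa using hb
        have ha' : a ∈ xs := (PySem.Set.mem_ofList xs a).1 ha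
        rw [hbx, PySem.List.index?_append_of_mem [x] ha',
          PySem.List.index?_append_singleton_self xs x hx']
        obtain ⟨k, hk⟩ := Option.isSome_iff_exists.1
          ((PySem.List.index?_isSome_iff xs a).2 ha')
        obtain ⟨hlt, -, -⟩ := PySem.List.getElem_of_index?_eq_some hk
        rw [PySem.List.index?_eq_idxOf?] at hk
        simp [hk, hlt]

-- B's setdefault loop: each key's value is its first index (offset by the enumerate start)
theorem pvIdx_fold (xs : List String) (s : Int) (d : PySem.Dict String Int) (t : String) :
    ((PySem.List.enumerate xs s).foldl
      (fun (d : PySem.Dict String Int) p => d.setdefault p.2 p.1) d).get? t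
    = if d.contains t then d.get? t
      else (PySem.List.index? xs t).map (fun k : Nat => s + (k : Int)) := by
  induction xs generalizing s d with
  | nil =>
    by_cases h : d.contains t
    · simp [PySem.List.enumerate, h]
    · have hf : d.contains t = false := by simpa using h
      simp [PySem.List.enumerate, h, (PySem.Dict.get?_eq_none_iff_contains d t).mpr hf]
  | cons x xs ih =>
    rw [PySem.List.enumerate_cons, List.foldl_cons, ih]
    by_cases htx : t = x
    · subst htx
      rw [if_pos (by simp [PySem.Dict.contains_setdefault]),
        PySem.Dict.get?_setdefault_self]
      by_cases h : d.contains t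
      · obtain ⟨v, hv⟩ := Option.isSome_iff_exists.1
          ((PySem.Dict.contains_eq_isSome_get? d t) ▸ h)
        simp [h, hv]
      · have hf : d.contains t = false := by simpa using h
        rw [if_neg h, (PySem.Dict.get?_eq_none_iff_contains d t).mpr hf,
          PySem.List.index?_cons_self]
        simp
    · rw [PySem.Dict.contains_setdefault, PySem.Dict.get?_setdefault_of_ne d s htx,
        PySem.List.index?_cons_of_ne xs (Ne.symm htx)]
      have : (t == x) = false := by simp [htx]
      rw [this, Bool.false_or]
      by_cases h : d.contains t
      · simp [h]
      · simp only [h, Bool.false_eq_true, if_neg, not_false_iff, Option.map_map]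
        congr 1
        funext k
        simp
        omega

theorem pvIdx_get? (orig : List String) (t : String) :
    ((PySem.List.enumerate orig).foldl
      (fun (d : PySem.Dict String Int) p => d.setdefault p.2 p.1) PySem.Dict.empty).get? t
    = (PySem.List.index? orig t).map (fun k : Nat => (k : Int)) := by
  rw [pvIdx_fold]
  simp [PySem.Dict.contains_empty]

-- B's sorted filtered set equals A's scan result
theorem pvLists_eq (orig summ : List String) :
    PySem.List.sorted
      ((PySem.Set.ofList summ).filter
        (fun t => ((PySem.List.enumerate orig).foldl
          (fun (d : PySem.Dict String Int) p => d.setdefault p.2 p.1) PySem.Dict.empty).contains t))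
      (fun t => ((PySem.List.enumerate orig).foldl
          (fun (d : PySem.Dict String Int) p => d.setdefault p.2 p.1) PySem.Dict.empty).getD t 0)
    = (PySem.Set.ofList orig).filter (fun t => decide (t ∈ PySem.Set.ofList summ)) := by
  have hcont : ∀ t, ((PySem.List.enumerate orig).foldl
      (fun (d : PySem.Dict String Int) p => d.setdefault p.2 p.1) PySem.Dict.empty).contains t
      = decide (t ∈ orig) := by
    intro t
    rw [PySem.Dict.contains_eq_isSome_get?, pvIdx_get?]
    by_cases h : t ∈ orig
    · obtain ⟨k, hk⟩ := Option.isSome_iff_exists.1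
        ((PySem.List.index?_isSome_iff orig t).2 h)
      simp [h]
    · rw [(PySem.List.index?_eq_none_iff orig t).2 h]
      simp [h]
  have hkey : ∀ t ∈ orig, ((PySem.List.enumerate orig).foldl
      (fun (d : PySem.Dict String Int) p => d.setdefault p.2 p.1) PySem.Dict.empty).getD t 0
      = ((PySem.List.index? orig t).getD 0 : Nat) := by
    intro t ht
    obtain ⟨k, hk⟩ := Option.isSome_iff_exists.1
      ((PySem.List.index?_isSome_iff orig t).2 ht)
    rw [PySem.Dict.getD_eq_get?_getD, pvIdx_get?, hk]
    simp
  apply PySem.List.sorted_eq_of_perm_of_pairwise_lt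
  · rw [List.perm_ext_iff_of_nodup
      (List.Nodup.filter _ (PySem.Set.nodup_ofList orig))
      (List.Nodup.filter _ (PySem.Set.nodup_ofList summ))]
    intro a
    simp [List.mem_filter, PySem.Set.mem_ofList, hcont, and_comm]
  · refine List.Pairwise.filter _ ?_
    refine List.Pairwise.imp_of_mem ?_ (pvPairwise_key orig)
    intro a b ha hb hab
    have ha' : a ∈ orig := (PySem.Set.mem_ofList orig a).1 ha
    have hb' : b ∈ orig := (PySem.Set.mem_ofList orig b).1 hb
    rw [hkey a ha', hkey b hb']
    exact_mod_cast hab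

-- ===== VERDICT (by name: the statement is the Claim_ definition above) =====
theorem reconstruct_summary_order_py_spec : Claim_equal_reconstruct_summary_order_py := by
  intro orig summ _
  unfold Spec_reconstruct_summary_order_py reconstruct_summary_order_py
    reconstruct_summary_order_py_alt
  simp only [PySem.Set.contains_eq_listContains, List.contains_eq_mem]
  rw [pvFoldA, List.nil_append, pvScan_eq_filter, pvLists_eq]
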